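-- pv_equiv track=rewrite | github.com/kylebegovich/CalHacks | python_sources/single_page_get.py | parse_ynm
-- ===== SOURCE A (Python) =====
-- def get_yeas(filtered_lines, index):
--     yeas = filtered_lines[index].split("<br>")
--     yeas[0] = yeas[0][26:]
--     return yeas
--
-- def get_nays(filtered_lines, index):
--     nays = filtered_lines[index].split("<br>")
--     nays[0] = nays[0][26:]
--     return nays
--
-- def get_miss(filtered_lines, index):
--     miss = filtered_lines[index].split("<br>")
--     miss[0] = miss[0][26:]
--     return miss
--
-- def parse_ynm(lines, filter_lines):
--     if len(filter_lines) == 3: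
--         yeas = get_yeas(filter_lines, 0)
--         nays = get_nays(filter_lines, 1)
--         miss = get_miss(filter_lines, 2)
--         return yeas, nays, miss
--
--     is_yeas = False
--     is_nays = False
--     is_miss = False
--     for l in lines:
--         if "YEAs ---" in l:
--             is_yeas = True
--         if "NAYs ---" in l:
--             is_nays = True
--         if "Not Voting -" in l:
--             is_miss = True
--     yeas = []
--     nays = []
--     miss = []
--     if is_yeas:
--         yeas = get_yeas(filter_lines, 0)
--         if is_nays:
--             nays = get_nays(filter_lines, 1)
--         else:
--             if is_miss:
--                 miss = get_miss(filter_lines, 1)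
--     else:
--         if is_nays:
--             nays = get_nays(filter_lines, 0)
--             if is_miss:
--                 miss = get_miss(filter_lines, 1)
--         else:
--             if is_miss:
--                 miss = get_miss(filter_lines, 0)
--     return yeas, nays, miss
-- ===== SOURCE B (Python) =====
-- def parse_ynm(lines, filter_lines):
--     def chunk(i):
--         parts = filter_lines[i].split("<br>")
--         parts[0] = parts[0][26:]
--         return parts
--     if len(filter_lines) == 3:
--         return chunk(0), chunk(1), chunk(2)
--     markers = ["YEAs ---", "NAYs ---", "Not Voting -"]
--     flagged = [k for k, m in enumerate(markers) if any(m in l for l in lines)]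
--     out = [[], [], []]
--     for i, k in enumerate(flagged[:2]):
--         out[k] = chunk(i)
--     return out[0], out[1], out[2]
-- ===== Notes on version B (the rewrite author's own statement) =====
-- stated objective: simpler
-- what changed: Replaces A's three duplicated helpers and the nested if/else flag chain by one chunk helper plus a data-driven pass: compute the list of flagged categories with any()-scans, then assign the first two flagged categories from filter_lines in one enumerate loop.
-- outside the precondition, e.g. on parse_ynm(['x YEAs --- y'], []): A raises IndexError, B raises IndexError
import Mathlib
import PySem

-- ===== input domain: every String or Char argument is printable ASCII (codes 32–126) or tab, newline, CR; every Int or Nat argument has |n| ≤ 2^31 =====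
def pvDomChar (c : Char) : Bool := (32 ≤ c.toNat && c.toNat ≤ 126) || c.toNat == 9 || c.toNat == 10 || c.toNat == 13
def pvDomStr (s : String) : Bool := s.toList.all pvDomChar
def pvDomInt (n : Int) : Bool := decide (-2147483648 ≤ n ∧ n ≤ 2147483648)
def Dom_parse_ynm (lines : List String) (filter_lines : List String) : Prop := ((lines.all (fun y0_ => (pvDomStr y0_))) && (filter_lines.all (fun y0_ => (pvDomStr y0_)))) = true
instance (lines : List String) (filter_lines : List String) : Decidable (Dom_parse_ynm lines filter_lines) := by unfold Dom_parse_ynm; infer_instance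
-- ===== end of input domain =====

-- B replaces A's three duplicated helpers and nested flag if/else chain by one chunk helper and a
-- data-driven loop over the list of flagged categories (objective: simpler; same cost).
-- Both A and B raise IndexError on the same inputs, which Pre_ excludes.

-- ===== PORT A =====
-- split on "<br>" (sep ≠ "" so split? is always `some` of a nonempty list; the [] branches are unreachable)
def get_yeas (filtered_lines : List String) (index : Int) : List String :=
  match PySem.Str.split? (PySem.List.pyGetD filtered_lines index "") "<br>" with
  | some (h :: t) => PySem.Str.slice h (some 26) none :: t
  | _ => []

def get_nays (filtered_lines : List String) (index : Int) : List String :=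
  match PySem.Str.split? (PySem.List.pyGetD filtered_lines index "") "<br>" with
  | some (h :: t) => PySem.Str.slice h (some 26) none :: t
  | _ => []

def get_miss (filtered_lines : List String) (index : Int) : List String :=
  match PySem.Str.split? (PySem.List.pyGetD filtered_lines index "") "<br>" with
  | some (h :: t) => PySem.Str.slice h (some 26) none :: t
  | _ => []

def parse_ynm (lines : List String) (filter_lines : List String) : List String × List String × List String :=
  if filter_lines.length = 3 then
    (get_yeas filter_lines 0, get_nays filter_lines 1, get_miss filter_lines 2)
  else
    let s := lines.foldl (fun (s : Bool × Bool × Bool) l =>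
      (s.1 || PySem.Str.isIn "YEAs ---" l,
       s.2.1 || PySem.Str.isIn "NAYs ---" l,
       s.2.2 || PySem.Str.isIn "Not Voting -" l)) (false, false, false)
    if s.1 then
      if s.2.1 then (get_yeas filter_lines 0, get_nays filter_lines 1, [])
      else if s.2.2 then (get_yeas filter_lines 0, [], get_miss filter_lines 1)
      else (get_yeas filter_lines 0, [], [])
    else
      if s.2.1 then
        if s.2.2 then ([], get_nays filter_lines 0, get_miss filter_lines 1)
        else ([], get_nays filter_lines 0, [])
      else if s.2.2 then ([], [], get_miss filter_lines 0)
      else ([], [], [])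

-- ===== PORT B =====
def chunkB (filter_lines : List String) (i : Int) : List String :=
  match PySem.Str.split? (PySem.List.pyGetD filter_lines i "") "<br>" with
  | some (h :: t) => PySem.Str.slice h (some 26) none :: t
  | _ => []

-- out[k] = c  on the triple
def setCat (out : List String × List String × List String) (k : Int) (c : List String) :
    List String × List String × List String :=
  if k = 0 then (c, out.2.1, out.2.2)
  else if k = 1 then (out.1, c, out.2.2)
  else (out.1, out.2.1, c)

def parse_ynm_alt (lines : List String) (filter_lines : List String) : List String × List String × List String :=
  if filter_lines.length = 3 then
    (chunkB filter_lines 0, chunkB filter_lines 1, chunkB filter_lines 2)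
  else
    let markers := ["YEAs ---", "NAYs ---", "Not Voting -"]
    let flagged := ((PySem.List.enumerate markers 0).filter
      (fun p => lines.any (fun l => PySem.Str.isIn p.2 l))).map (·.1)
    (PySem.List.enumerate (PySem.List.slice flagged none (some 2)) 0).foldl
      (fun out p => setCat out p.2 (chunkB filter_lines p.1)) ([], [], [])

-- ===== PRECONDITION & SPEC =====
-- Pre_ excludes exactly the inputs on which A raises IndexError: when len(filter_lines) ≠ 3,
-- filter_lines must have at least min(number of flagged categories, 2) entries.
def Pre_parse_ynm (lines : List String) (filter_lines : List String) : Prop :=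
  filter_lines.length = 3 ∨
    min ((if lines.any (fun l => PySem.Str.isIn "YEAs ---" l) then 1 else 0)
       + (if lines.any (fun l => PySem.Str.isIn "NAYs ---" l) then 1 else 0)
       + (if lines.any (fun l => PySem.Str.isIn "Not Voting -" l) then 1 else 0)) 2
      ≤ filter_lines.length
instance (lines : List String) (filter_lines : List String) : Decidable (Pre_parse_ynm lines filter_lines) := by unfold Pre_parse_ynm; infer_instance

def pvWitness_parse_ynm : List String × List String :=
  (["x YEAs --- y"], ["aaaaaaaaaaaaaaaaaaaaaaaaaaGridley<br>Jones"])

def Spec_parse_ynm (lines : List String) (filter_lines : List String) (out : List String × List String × List String) : Prop := out = parse_ynm_alt lines filter_lines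
instance (lines : List String) (filter_lines : List String) (out : List String × List String × List String) : Decidable (Spec_parse_ynm lines filter_lines out) := by unfold Spec_parse_ynm; infer_instance

-- ===== CLAIM (what is proved, stated in full; the proofs are below) =====
def Claim_equal_parse_ynm : Prop := ∀ (lines : List String) (filter_lines : List String), Dom_parse_ynm lines filter_lines → Pre_parse_ynm lines filter_lines → Spec_parse_ynm lines filter_lines (parse_ynm lines filter_lines)

-- ===== LEMMAS AND PROOFS =====
-- A's single flag loop computes the three any()-scans B performs.
lemma flags_foldl (lines : List String) (x y z : Bool) :
    lines.foldl (fun (s : Bool × Bool × Bool) l =>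
      (s.1 || PySem.Str.isIn "YEAs ---" l,
       s.2.1 || PySem.Str.isIn "NAYs ---" l,
       s.2.2 || PySem.Str.isIn "Not Voting -" l)) (x, y, z)
    = (x || lines.any (fun l => PySem.Str.isIn "YEAs ---" l),
       y || lines.any (fun l => PySem.Str.isIn "NAYs ---" l),
       z || lines.any (fun l => PySem.Str.isIn "Not Voting -" l)) := by
  induction lines generalizing x y z with
  | nil => simp
  | cons h t ih => rw [List.foldl_cons, ih]; simp [Bool.or_assoc]

theorem parse_ynm_spec : Claim_equal_parse_ynm := by
  intro lines filter_lines _ _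
  show parse_ynm lines filter_lines = parse_ynm_alt lines filter_lines
  unfold parse_ynm parse_ynm_alt
  by_cases h3 : filter_lines.length = 3
  · simp only [h3]
    rfl
  · simp only [h3, if_false, flags_foldl]
    cases hy : lines.any (fun l => PySem.Str.isIn "YEAs ---" l) <;>
    cases hn : lines.any (fun l => PySem.Str.isIn "NAYs ---" l) <;>
    cases hm : lines.any (fun l => PySem.Str.isIn "Not Voting -" l) <;>
      simp only [hy, hn, hm, Bool.false_or, if_true, if_false, Bool.false_eq_true,
        List.filter, List.map, PySem.List.enumerate_cons, PySem.List.enumerate_nil,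
        get_yeas, get_nays, get_miss, chunkB] <;>
      simp [PySem.List.slice, PySem.List.clampIdx, PySem.List.enumerate, List.foldl, setCat]

-- ===== VERDICT (by name: the statement is the Claim_ definition above) =====
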